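-- pv_equiv track=rewrite | github.com/likai-xixi/sili-jian-orchestrator | assets/project-skeleton/ai/tools/validate_gates.py | field_has_items
-- ===== SOURCE A (Python) =====
-- EMPTY_VALUES = {"", "none", "n/a", "na"}
--
-- def normalize_field_value(value: str) -> str:
--     stripped = value.strip()
--     if stripped.startswith("- "):
--         return stripped[2:].strip()
--     return stripped
--
-- def extract_field_values(text: str, field_name: str) -> list[str]:
--     target = f"- {field_name.strip().lower()}:"
--     lines = text.splitlines()
--     for index, line in enumerate(lines):
--         stripped = line.strip()
--         if not stripped.lower().startswith(target):
--             continue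
--
--         values: list[str] = []
--         inline_value = normalize_field_value(stripped[len(target):].strip())
--         if inline_value:
--             values.append(inline_value)
--
--         for follow in lines[index + 1 :]:
--             follow_text = follow.rstrip()
--             follow_stripped = follow_text.strip()
--             if not follow_stripped:
--                 continue
--             if follow_text.startswith("  ") or follow_text.startswith("\t"):
--                 values.append(normalize_field_value(follow_stripped))
--                 continue
--             break
--         return values
--     return []
--
-- def field_has_items(text: str, field_name: str) -> bool:
--     values = extract_field_values(text, field_name)
--     if not values:
--         return False
--     for value in values:
--         lowered = value.lower()
--         if "[fill here]" in lowered or " / " in value: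
--             continue
--         if lowered not in EMPTY_VALUES:
--             return True
--     return False
-- ===== SOURCE B (Python) =====
-- EMPTY_VALUES = {"", "none", "n/a", "na"}
--
-- def _keeps(value):
--     v = value.strip()
--     if v.startswith("- "):
--         v = v[2:].strip()
--     lowered = v.lower()
--     return "[fill here]" not in lowered and " / " not in v and lowered not in EMPTY_VALUES
--
-- def field_has_items(text, field_name):
--     target = f"- {field_name.strip().lower()}:"
--     lines = text.splitlines()
--     for index, line in enumerate(lines):
--         stripped = line.strip()
--         if not stripped.lower().startswith(target):
--             continue
--         if _keeps(stripped[len(target):].strip()):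
--             return True
--         for follow in lines[index + 1:]:
--             follow_text = follow.rstrip()
--             follow_stripped = follow_text.strip()
--             if not follow_stripped:
--                 continue
--             if not (follow_text.startswith("  ") or follow_text.startswith("\t")):
--                 return False
--             if _keeps(follow_stripped):
--                 return True
--         return False
--     return False
-- ===== Notes on version B (the rewrite author's own statement) =====
-- stated objective: simpler
-- what changed: A collects all field values into an intermediate list and then filters it in a second loop; B fuses both stages into one scan that applies the normalize+filter predicate to each value as it is encountered and returns True on the first survivor, building no list.
import Mathlib
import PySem

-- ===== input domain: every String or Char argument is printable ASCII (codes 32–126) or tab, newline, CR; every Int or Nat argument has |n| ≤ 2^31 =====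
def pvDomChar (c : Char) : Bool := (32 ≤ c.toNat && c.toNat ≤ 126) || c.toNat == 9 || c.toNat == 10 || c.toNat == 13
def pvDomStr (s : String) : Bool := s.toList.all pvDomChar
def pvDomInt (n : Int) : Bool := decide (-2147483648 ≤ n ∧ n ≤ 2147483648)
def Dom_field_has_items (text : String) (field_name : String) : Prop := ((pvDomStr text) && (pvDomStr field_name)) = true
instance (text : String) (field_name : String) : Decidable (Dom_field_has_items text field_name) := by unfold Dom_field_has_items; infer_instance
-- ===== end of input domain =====

-- B fuses A's two-stage "collect all field values, then filter them" into one scan that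
-- applies the filter immediately and returns on the first surviving value (objective: simpler, no intermediate list).

-- ===== PORT A =====
-- normalize_field_value
def pvNormA (value : List Char) : List Char :=
  let stripped := PySem.Chars.strip value
  if PySem.Chars.startswith stripped ['-', ' '] then
    PySem.Chars.strip (PySem.Chars.slice stripped (some 2) none)
  else stripped

-- inner 'for follow in lines[index+1:]' loop of extract_field_values
def pvFollowA (values : List (List Char)) : List (List Char) → List (List Char)
  | [] => values
  | follow :: rest =>
    let followText := PySem.Chars.rstrip follow
    let followStripped := PySem.Chars.strip followText
    if followStripped.isEmpty then pvFollowA values rest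
    else if PySem.Chars.startswith followText [' ', ' '] || PySem.Chars.startswith followText ['\t'] then
      pvFollowA (values ++ [pvNormA followStripped]) rest
    else values

-- outer 'for index, line in enumerate(lines)' loop of extract_field_values
def pvExtractA (target : List Char) : List (List Char) → List (List Char)
  | [] => []
  | line :: rest =>
    let stripped := PySem.Chars.strip line
    if !(PySem.Chars.startswith (PySem.Chars.lower stripped) target) then pvExtractA target rest
    else
      let inlineValue := pvNormA (PySem.Chars.strip (PySem.Chars.slice stripped (some (target.length : Int)) none))
      let values := if inlineValue.isEmpty then [] else [inlineValue]
      pvFollowA values rest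

-- 'for value in values' filter loop of field_has_items
def pvCheckA : List (List Char) → Bool
  | [] => false
  | value :: rest =>
    let lowered := PySem.Chars.lower value
    if PySem.Chars.isIn "[fill here]".toList lowered || PySem.Chars.isIn " / ".toList value then
      pvCheckA rest
    else if [([] : List Char), "none".toList, "n/a".toList, "na".toList].contains lowered then
      pvCheckA rest
    else true

def field_has_items (text : String) (field_name : String) : Bool :=
  let target := ['-', ' '] ++ PySem.Chars.lower (PySem.Chars.strip field_name.toList) ++ [':']
  let values := pvExtractA target (PySem.Chars.splitlines text.toList)
  if values.isEmpty then false else pvCheckA values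

-- ===== PORT B =====
-- _keeps: normalize the value and test the filter in one predicate
def pvKeepsB (value : List Char) : Bool :=
  let v := PySem.Chars.strip value
  let v := if PySem.Chars.startswith v ['-', ' '] then PySem.Chars.strip (PySem.Chars.slice v (some 2) none) else v
  let lowered := PySem.Chars.lower v
  !(PySem.Chars.isIn "[fill here]".toList lowered) && !(PySem.Chars.isIn " / ".toList v)
    && !([([] : List Char), "none".toList, "n/a".toList, "na".toList].contains lowered)

-- fused follow-line scan: True on the first surviving value, False on break / exhaustion
def pvScanFollowB : List (List Char) → Bool
  | [] => false
  | follow :: rest =>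
    let followText := PySem.Chars.rstrip follow
    let followStripped := PySem.Chars.strip followText
    if followStripped.isEmpty then pvScanFollowB rest
    else if !(PySem.Chars.startswith followText [' ', ' '] || PySem.Chars.startswith followText ['\t']) then false
    else if pvKeepsB followStripped then true
    else pvScanFollowB rest

-- fused main scan over the lines
def pvScanB (target : List Char) : List (List Char) → Bool
  | [] => false
  | line :: rest =>
    let stripped := PySem.Chars.strip line
    if !(PySem.Chars.startswith (PySem.Chars.lower stripped) target) then pvScanB target rest
    else if pvKeepsB (PySem.Chars.strip (PySem.Chars.slice stripped (some (target.length : Int)) none)) then true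
    else pvScanFollowB rest

def field_has_items_alt (text : String) (field_name : String) : Bool :=
  let target := ['-', ' '] ++ PySem.Chars.lower (PySem.Chars.strip field_name.toList) ++ [':']
  pvScanB target (PySem.Chars.splitlines text.toList)

-- ===== PRECONDITION & SPEC =====
def Spec_field_has_items (text : String) (field_name : String) (out : Bool) : Prop := out = field_has_items_alt text field_name
instance (text : String) (field_name : String) (out : Bool) : Decidable (Spec_field_has_items text field_name out) := by unfold Spec_field_has_items; infer_instance

-- ===== CLAIM (what is proved, stated in full; the proofs are below) =====
def Claim_equal_field_has_items : Prop := ∀ (text : String) (field_name : String), Dom_field_has_items text field_name → Spec_field_has_items text field_name (field_has_items text field_name)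

-- ===== LEMMAS AND PROOFS =====

-- A's filter test on one (already normalized) value
def pvOkA (value : List Char) : Bool :=
  let lowered := PySem.Chars.lower value
  !(PySem.Chars.isIn "[fill here]".toList lowered) && !(PySem.Chars.isIn " / ".toList value)
    && !([([] : List Char), "none".toList, "n/a".toList, "na".toList].contains lowered)

theorem pvKeepsB_eq (v : List Char) : pvKeepsB v = pvOkA (pvNormA v) := rfl

theorem pvOkA_nil : pvOkA [] = false := by decide

theorem pvCheckA_eq_any (l : List (List Char)) : pvCheckA l = l.any pvOkA := by
  induction l with
  | nil => rfl
  | cons v rest ih =>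
    simp only [pvCheckA, pvOkA, List.any_cons, ih]
    generalize PySem.Chars.isIn "[fill here]".toList (PySem.Chars.lower v) = a
    generalize PySem.Chars.isIn " / ".toList v = b
    generalize [([] : List Char), "none".toList, "n/a".toList, "na".toList].contains (PySem.Chars.lower v) = c
    cases a <;> cases b <;> cases c <;> simp

theorem pvCheckA_cons (x : List Char) (l : List (List Char)) :
    pvCheckA (x :: l) = (pvOkA x || pvCheckA l) := by
  simp [pvCheckA_eq_any]

theorem pvFollowA_append (values : List (List Char)) (l : List (List Char)) :
    pvFollowA values l = values ++ pvFollowA [] l := by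
  induction l generalizing values with
  | nil => simp [pvFollowA]
  | cons f rest ih =>
    simp only [pvFollowA, List.nil_append]
    split_ifs with h1 h2
    · exact ih values
    · rw [ih (values ++ _), ih [_]]; simp
    · simp

theorem pvFollow_scan (l : List (List Char)) :
    pvScanFollowB l = pvCheckA (pvFollowA [] l) := by
  induction l with
  | nil => rfl
  | cons f rest ih =>
    simp only [pvScanFollowB, pvFollowA, List.nil_append]
    cases he : (PySem.Chars.strip (PySem.Chars.rstrip f)).isEmpty
    · cases hs : (PySem.Chars.startswith (PySem.Chars.rstrip f) [' ', ' '] || PySem.Chars.startswith (PySem.Chars.rstrip f) ['\t'])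
      · simp [pvCheckA]
      · simp only [Bool.not_true, if_true, if_false, Bool.false_eq_true]
        rw [pvFollowA_append, List.singleton_append, pvCheckA_cons, ← pvKeepsB_eq]
        cases hk : pvKeepsB (PySem.Chars.strip (PySem.Chars.rstrip f)) <;> simp [ih]
    · simp [ih]

theorem pvInlineAny (inl : List Char) :
    (if inl.isEmpty then ([] : List (List Char)) else [inl]).any pvOkA = pvOkA inl := by
  cases inl <;> simp [pvOkA_nil]

theorem pvScan_eq (target : List Char) (l : List (List Char)) :
    pvScanB target l = pvCheckA (pvExtractA target l) := by
  induction l with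
  | nil => rfl
  | cons line rest ih =>
    simp only [pvScanB, pvExtractA]
    cases hm : PySem.Chars.startswith (PySem.Chars.lower (PySem.Chars.strip line)) target
    · simpa [hm] using ih
    · simp only [Bool.not_true, if_false, Bool.false_eq_true]
      rw [pvFollowA_append, pvCheckA_eq_any, List.any_append, pvInlineAny, ← pvCheckA_eq_any,
        ← pvFollow_scan, pvKeepsB_eq]
      cases hk : pvOkA (pvNormA (PySem.Chars.strip (PySem.Chars.slice (PySem.Chars.strip line) (some (target.length : Int)) none))) <;>
        simp

-- ===== VERDICT (by name: the statement is the Claim_ definition above) =====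
theorem field_has_items_spec : Claim_equal_field_has_items := by
  intro text field_name _
  unfold Spec_field_has_items
  simp only [field_has_items, field_has_items_alt]
  rw [pvScan_eq]
  cases hE : pvExtractA (['-', ' '] ++ PySem.Chars.lower (PySem.Chars.strip field_name.toList) ++ [':']) (PySem.Chars.splitlines text.toList) <;>
    simp [pvCheckA]
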